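-- pv_equiv track=rewrite | github.com/nziegler87/FoundationsOfCompSci | Project/Fiddle Files/diagonal_test2.py | make_lst_alpha
-- ===== SOURCE A (Python) =====
-- def make_lst_alpha(row, col, letter):
--     count = ord(letter)
--     master = []
--     for i in range(row):
--         row = []
--         for j in range(col):
--             if count == ord(letter) + 26:
--                 count = ord(letter)
--             row.append(chr(count))
--             count += 1
--         master.append(row)
--     return master
-- ===== SOURCE B (Python) =====
-- def make_lst_alpha(row, col, letter):
--     base = ord(letter)
--     return [[chr(base + (i * col + j) % 26) for j in range(col)]
--             for i in range(row)]
-- ===== Notes on version B (the rewrite author's own statement) =====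
-- stated objective: simpler
-- what changed: Replaces the mutable counter threaded across all cells (with its per-26 reset branch) by a closed-form positional formula chr(base + (i*col + j) % 26) in a nested comprehension; no state flows between cells. Pre_ excludes only letter strings of length != 1, on which both A and B raise TypeError in ord().
import Mathlib
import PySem

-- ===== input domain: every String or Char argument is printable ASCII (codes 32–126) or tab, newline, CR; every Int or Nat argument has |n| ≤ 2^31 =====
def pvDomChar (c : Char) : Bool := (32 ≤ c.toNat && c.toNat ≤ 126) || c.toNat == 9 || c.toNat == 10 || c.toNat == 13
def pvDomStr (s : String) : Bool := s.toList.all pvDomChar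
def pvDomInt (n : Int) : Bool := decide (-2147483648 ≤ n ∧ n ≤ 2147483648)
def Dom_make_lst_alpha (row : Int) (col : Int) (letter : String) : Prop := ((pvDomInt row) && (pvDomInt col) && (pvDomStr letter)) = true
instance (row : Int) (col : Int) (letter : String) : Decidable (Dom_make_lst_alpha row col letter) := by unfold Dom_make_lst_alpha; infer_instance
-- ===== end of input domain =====

-- B replaces A's cross-cell mutable counter (with its per-26 reset branch) by the closed-form
-- positional formula chr(base + (i*col + j) % 26); objective: simpler (no state between cells).

-- chr(n): exact for 0 ≤ n < 0x110000 outside the surrogate range; every value reached here is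
-- base + r with 32 ≤ base ≤ 126 (Dom) and 0 ≤ r ≤ 25, well inside that range.
-- (each port carries its own copy so the two definition closures stay disjoint)
def pyChrA (n : Int) : String := String.ofList [Char.ofNat n.toNat]
def pyChrB (n : Int) : String := String.ofList [Char.ofNat n.toNat]

-- ===== PORT A =====
def make_lst_alpha (row : Int) (col : Int) (letter : String) : List (List String) :=
  match letter.toList with
  | [ch] =>  -- ord(letter); any other length raises TypeError (excluded by Pre_)
    let base : Int := ch.toNat
    ((PySem.List.pyRange 0 row 1).foldl
      (fun s _i =>
        let inner := (PySem.List.pyRange 0 col 1).foldl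
          (fun t _j =>
            let count := if t.1 = base + 26 then base else t.1
            (count + 1, t.2 ++ [pyChrA count]))
          (s.1, ([] : List String))
        (inner.1, s.2 ++ [inner.2]))
      (base, ([] : List (List String)))).2
  | _ => []

-- ===== PORT B =====
def make_lst_alpha_alt (row : Int) (col : Int) (letter : String) : List (List String) :=
  -- ord(letter): defined when letter has exactly one character, else TypeError (excluded by Pre_)
  if letter.toList.length = 1 then
    let base : Int := (letter.toList.headD ' ').toNat
    (PySem.List.pyRange 0 row 1).map (fun i =>
      (PySem.List.pyRange 0 col 1).map (fun j =>
        pyChrB (base + PySem.Int.mod (i * col + j) 26)))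
  else []

-- ===== PRECONDITION & SPEC =====
-- ord(letter) raises TypeError unless letter has exactly one character; both A and B raise there.
def Pre_make_lst_alpha (row : Int) (col : Int) (letter : String) : Prop :=
  letter.toList.length = 1
instance (row : Int) (col : Int) (letter : String) : Decidable (Pre_make_lst_alpha row col letter) := by unfold Pre_make_lst_alpha; infer_instance

def pvWitness_make_lst_alpha : Int × Int × String := (2, 3, "a")

def Spec_make_lst_alpha (row : Int) (col : Int) (letter : String) (out : List (List String)) : Prop := out = make_lst_alpha_alt row col letter
instance (row : Int) (col : Int) (letter : String) (out : List (List String)) : Decidable (Spec_make_lst_alpha row col letter out) := by unfold Spec_make_lst_alpha; infer_instance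

-- ===== CLAIM (what is proved, stated in full; the proofs are below) =====
def Claim_equal_make_lst_alpha : Prop := ∀ (row : Int) (col : Int) (letter : String), Dom_make_lst_alpha row col letter → Pre_make_lst_alpha row col letter → Spec_make_lst_alpha row col letter (make_lst_alpha row col letter)

-- ===== LEMMAS AND PROOFS =====

-- the counter value entering cell number k (0-based, counted linearly across rows)
def pvCnt (base : Int) (k : Nat) : Int :=
  if k ≠ 0 ∧ k % 26 = 0 then base + 26 else base + ((k % 26 : Nat) : Int)

-- a fold whose body ignores the list elements is an iterate
theorem pv_foldl_const {α σ : Type} (f : σ → σ) (l : List α) (init : σ) :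
    l.foldl (fun s _ => f s) init = f^[l.length] init := by
  induction l generalizing init with
  | nil => rfl
  | cons x xs ih => simp [List.foldl, ih, Function.iterate_succ_apply]

theorem pv_cnt_sel (base : Int) (k : Nat) :
    (if pvCnt base k = base + 26 then base else pvCnt base k) = base + ((k % 26 : Nat) : Int) := by
  unfold pvCnt
  split_ifs <;> push_cast <;> omega

theorem pv_cnt_succ (base : Int) (k : Nat) :
    base + ((k % 26 : Nat) : Int) + 1 = pvCnt base (k + 1) := by
  unfold pvCnt
  split_ifs <;> push_cast <;> omega

theorem pv_inner_iter (base : Int) (m k : Nat) (acc : List String) :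
    (fun t : Int × List String =>
      ((if t.1 = base + 26 then base else t.1) + 1,
       t.2 ++ [pyChrA (if t.1 = base + 26 then base else t.1)]))^[m] (pvCnt base k, acc)
    = (pvCnt base (k + m),
       acc ++ (List.range m).map (fun j => pyChrA (base + (((k + j) % 26 : Nat) : Int)))) := by
  induction m with
  | zero => simp
  | succ n ih =>
    rw [Function.iterate_succ_apply', ih]
    simp only [Prod.mk.injEq]
    constructor
    · rw [pv_cnt_sel base (k + n), pv_cnt_succ base (k + n), Nat.add_assoc]
    · rw [pv_cnt_sel base (k + n), List.range_succ]
      simp [List.append_assoc]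

theorem pv_outer_iter (base : Int) (m r i : Nat) (acc : List (List String)) :
    (fun s : Int × List (List String) =>
      (((fun t : Int × List String =>
           ((if t.1 = base + 26 then base else t.1) + 1,
            t.2 ++ [pyChrA (if t.1 = base + 26 then base else t.1)]))^[m] (s.1, ([] : List String))).1,
       s.2 ++ [((fun t : Int × List String =>
           ((if t.1 = base + 26 then base else t.1) + 1,
            t.2 ++ [pyChrA (if t.1 = base + 26 then base else t.1)]))^[m] (s.1, ([] : List String))).2]))^[r]
      (pvCnt base (i * m), acc)
    = (pvCnt base ((i + r) * m),
       acc ++ (List.range r).map (fun t =>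
         (List.range m).map (fun j => pyChrA (base + ((((i + t) * m + j) % 26 : Nat) : Int))))) := by
  induction r with
  | zero => simp
  | succ n ih =>
    rw [Function.iterate_succ_apply', ih]
    simp only
    rw [pv_inner_iter base m ((i + n) * m) []]
    simp only [Prod.mk.injEq]
    constructor
    · congr 1
      ring
    · rw [List.range_succ]
      simp [List.append_assoc]

-- ===== VERDICT (by name: the statement is the Claim_ definition above) =====
theorem make_lst_alpha_spec : Claim_equal_make_lst_alpha := by
  intro row col letter _hdom hpre
  unfold Spec_make_lst_alpha make_lst_alpha make_lst_alpha_alt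
  obtain ⟨c, hc⟩ : ∃ c, letter.toList = [c] := by
    rcases h : letter.toList with _ | ⟨c, _ | _⟩ <;> simp_all [Pre_make_lst_alpha]
  rw [hc]
  simp only [List.length_cons, List.length_nil, List.headD_cons, if_pos]
  simp only [pv_foldl_const, PySem.List.length_pyRange_one, Int.sub_zero]
  have h0 : ((c.toNat : Int), ([] : List (List String)))
      = (pvCnt (c.toNat : Int) (0 * col.toNat), []) := by simp [pvCnt]
  rw [h0, pv_outer_iter (c.toNat : Int) col.toNat row.toNat 0 []]
  rw [PySem.List.pyRange_one 0 row, PySem.List.pyRange_one 0 col]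
  simp only [Int.sub_zero, List.map_map, List.nil_append, zero_add]
  have hAB : pyChrA = pyChrB := rfl
  simp only [hAB]
  apply List.map_congr_left
  intro t _
  by_cases hcol : col ≤ 0
  · have hm0 : col.toNat = 0 := by omega
    simp [hm0]
  · have hcm : col = ((col.toNat : Nat) : Int) := by omega
    apply List.map_congr_left
    intro j _
    congr 1
    have hij : ((t : Int)) * col + (j : Int) = ((t * col.toNat + j : Nat) : Int) := by
      rw [hcm]; push_cast [Int.toNat_natCast]; ring
    rw [hij]
    have hmod := PySem.Int.mod_natCast (t * col.toNat + j) 26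
    push_cast at hmod ⊢
    omega
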